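-- pv_equiv track=rewrite | github.com/RhoHeeSeon/Coding-Study | 프로그래머스_프린터.py | search
-- ===== SOURCE A (Python) =====
-- def search(priorities, next, cnt):
--     index = next
--     for i in range(cnt-1):
--         index += 1
--         if index == cnt: index = 0
--         if priorities[next] < priorities[index]:
--             next = index
--
--     return next
-- ===== SOURCE B (Python) =====
-- def search(priorities, next, cnt):
--     if cnt <= 1:
--         return next
--     order = [next]
--     for _ in range(cnt - 1):
--         i = order[-1] + 1
--         order.append(0 if i == cnt else i)
--     best = max(priorities[i] for i in order)
--     for i in order:
--         if priorities[i] == best: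
--             return i
-- ===== Notes on version B (the rewrite author's own statement) =====
-- stated objective: alternative
-- what changed: B separates A's fused running-champion scan into three phases: materialize the visited index order, compute the maximum priority over it, and return the first visited index attaining that maximum.
import Mathlib
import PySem

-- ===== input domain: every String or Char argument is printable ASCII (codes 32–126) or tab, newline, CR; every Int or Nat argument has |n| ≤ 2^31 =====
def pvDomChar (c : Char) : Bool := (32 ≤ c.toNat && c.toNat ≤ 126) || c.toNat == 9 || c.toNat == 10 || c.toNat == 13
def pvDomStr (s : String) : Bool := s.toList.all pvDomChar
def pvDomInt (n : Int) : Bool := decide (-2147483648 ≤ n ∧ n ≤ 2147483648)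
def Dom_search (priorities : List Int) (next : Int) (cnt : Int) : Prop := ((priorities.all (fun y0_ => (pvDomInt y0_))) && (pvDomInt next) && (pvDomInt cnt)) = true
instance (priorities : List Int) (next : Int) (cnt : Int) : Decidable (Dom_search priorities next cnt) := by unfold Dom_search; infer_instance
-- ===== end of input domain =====

-- B replaces A's fused running-champion scan by three phases: materialize the visited order,
-- take the max priority over it, return the first visited index attaining it (objective: alternative).

-- ===== PORT A =====
def search (priorities : List Int) (next : Int) (cnt : Int) : Int :=
  ((PySem.List.pyRange 0 (cnt - 1) 1).foldl
      (fun (st : Int × Int) (_i : Int) =>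
        let index := st.1 + 1
        let index := if index = cnt then 0 else index
        if PySem.List.pyGetD priorities st.2 0 < PySem.List.pyGetD priorities index 0
          then (index, index) else (index, st.2))
      (next, next)).2

-- ===== PORT B =====
def search_alt (priorities : List Int) (next : Int) (cnt : Int) : Int :=
  if cnt ≤ 1 then next
  else
    let order := (PySem.List.pyRange 0 (cnt - 1) 1).foldl
      (fun (order : List Int) (_ : Int) =>
        let i := PySem.List.pyGetD order (-1) 0 + 1
        order ++ [if i = cnt then 0 else i])
      [next]
    let best := (PySem.List.max? (order.map (fun i => PySem.List.pyGetD priorities i 0)) (fun v => v)).getD 0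
    (order.find? (fun i => PySem.List.pyGetD priorities i 0 == best)).getD 0

-- ===== PRECONDITION & SPEC =====
-- Pre_ is exactly the set of inputs on which Python A returns normally: with cnt ≥ 2 every visited
-- position (next, then the wrap-at-cnt successors) must be a valid Python index of priorities,
-- otherwise A raises IndexError; the arithmetic below characterises that in closed form.
def Pre_search (priorities : List Int) (next : Int) (cnt : Int) : Prop :=
  cnt ≤ 1 ∨ (-(priorities.length : Int) ≤ next ∧ next < (priorities.length : Int) ∧
    (1 ≤ next ∧ next < cnt → cnt ≤ (priorities.length : Int)) ∧
    ((next ≤ 0 ∨ cnt ≤ next) → next + cnt - 1 < (priorities.length : Int)))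
instance (priorities : List Int) (next : Int) (cnt : Int) : Decidable (Pre_search priorities next cnt) := by
  unfold Pre_search; infer_instance

def pvWitness_search : List Int × Int × Int := ([2, 1, 3, 2], 2, 4)

def Spec_search (priorities : List Int) (next : Int) (cnt : Int) (out : Int) : Prop := out = search_alt priorities next cnt
instance (priorities : List Int) (next : Int) (cnt : Int) (out : Int) : Decidable (Spec_search priorities next cnt out) := by unfold Spec_search; infer_instance

-- ===== CLAIM (what is proved, stated in full; the proofs are below) =====
def Claim_equal_search : Prop := ∀ (priorities : List Int) (next : Int) (cnt : Int), Dom_search priorities next cnt → Pre_search priorities next cnt → Spec_search priorities next cnt (search priorities next cnt)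

-- ===== LEMMAS AND PROOFS =====

-- the running-champion step of A
def pvChamp (p : Int → Int) (a i : Int) : Int := if p a < p i then i else a

-- the indices appended by B's order-building loop when it starts from a list ending in x
def pvSuffix (cnt : Int) : List Int → Int → List Int
  | [], _ => []
  | _ :: t, x => (if x + 1 = cnt then 0 else x + 1) :: pvSuffix cnt t (if x + 1 = cnt then 0 else x + 1)

-- the last visited index after the same steps
def pvLast (cnt : Int) : List Int → Int → Int
  | [], x => x
  | _ :: t, x => pvLast cnt t (if x + 1 = cnt then 0 else x + 1)

theorem pv_le_foldl_max (l : List Int) (a : Int) : a ≤ l.foldl max a := by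
  induction l generalizing a with
  | nil => simp
  | cons x t ih => exact le_trans (le_max_left a x) (ih (max a x))

-- A's champion fold is the first element of c :: l (in list order) attaining the maximum of p over c :: l
theorem pv_champ_find (p : Int → Int) (l : List Int) (c : Int) :
    (c :: l).find? (fun i => p i == (l.map p).foldl max (p c))
      = some (l.foldl (pvChamp p) c) := by
  induction l generalizing c with
  | nil => simp
  | cons i l' ih =>
    by_cases hci : p c < p i
    · have hM : ((i :: l').map p).foldl max (p c) = (l'.map p).foldl max (p i) := by
        simp [max_eq_right (le_of_lt hci)]
      have hcM : p c < (l'.map p).foldl max (p i) :=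
        lt_of_lt_of_le hci (pv_le_foldl_max _ _)
      have hb1 : (p c == (l'.map p).foldl max (p i)) = false := by
        simp [Int.ne_of_lt hcM]
      simp only [List.find?, List.foldl, pvChamp, if_pos hci, hM, hb1]
      exact ih i
    · have hic : p i ≤ p c := le_of_not_gt hci
      have hM : ((i :: l').map p).foldl max (p c) = (l'.map p).foldl max (p c) := by
        simp [max_eq_left hic]
      have hih := ih c
      by_cases hc : p c = (l'.map p).foldl max (p c)
      · have hb : (p c == (l'.map p).foldl max (p c)) = true := by
          simp only [beq_iff_eq]; exact hc
        simp only [List.find?, hb] at hih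
        simp only [List.find?, List.foldl, pvChamp, if_neg hci, hM, hb]
        exact hih
      · have hcle : p c ≤ (l'.map p).foldl max (p c) := pv_le_foldl_max _ _
        have hclt : p c < (l'.map p).foldl max (p c) := lt_of_le_of_ne hcle hc
        have hilt : p i < (l'.map p).foldl max (p c) := lt_of_le_of_lt hic hclt
        have hb1 : (p c == (l'.map p).foldl max (p c)) = false := by
          simp [Int.ne_of_lt hclt]
        have hb2 : (p i == (l'.map p).foldl max (p c)) = false := by
          simp [Int.ne_of_lt hilt]
        simp only [List.find?, hb1] at hih
        simp only [List.find?, List.foldl, pvChamp, if_neg hci, hM, hb1, hb2]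
        exact hih

-- B's order-building loop only reads the last element: it appends exactly pvSuffix
theorem pv_loopB (cnt : Int) (l : List Int) : ∀ (pre : List Int) (x : Int),
    l.foldl
      (fun (order : List Int) (_ : Int) =>
        let i := PySem.List.pyGetD order (-1) 0 + 1
        order ++ [if i = cnt then 0 else i])
      (pre ++ [x]) = (pre ++ [x]) ++ pvSuffix cnt l x := by
  induction l with
  | nil => intro pre x; simp [pvSuffix]
  | cons a t ih =>
    intro pre x
    simp only [List.foldl, PySem.List.pyGetD_neg_one_append_singleton]
    rw [ih (pre ++ [x]) (if x + 1 = cnt then 0 else x + 1)]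
    simp [pvSuffix]

-- A's loop is the champion fold over the same appended indices
theorem pv_loopA (priorities : List Int) (cnt : Int) (l : List Int) : ∀ (x c : Int),
    l.foldl
      (fun (st : Int × Int) (_i : Int) =>
        let index := st.1 + 1
        let index := if index = cnt then 0 else index
        if PySem.List.pyGetD priorities st.2 0 < PySem.List.pyGetD priorities index 0
          then (index, index) else (index, st.2))
      (x, c)
    = (pvLast cnt l x,
       (pvSuffix cnt l x).foldl (pvChamp (fun i => PySem.List.pyGetD priorities i 0)) c) := by
  induction l with
  | nil => intro x c; simp [pvSuffix, pvLast]
  | cons a t ih =>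
    intro x c
    rw [List.foldl_cons]
    have hred : (let index := (x, c).1 + 1
          let index := if index = cnt then 0 else index
          if PySem.List.pyGetD priorities (x, c).2 0 < PySem.List.pyGetD priorities index 0
            then (index, index) else (index, (x, c).2))
        = ((if x + 1 = cnt then 0 else x + 1),
           pvChamp (fun i => PySem.List.pyGetD priorities i 0) c
             (if x + 1 = cnt then 0 else x + 1)) := by
      simp only [pvChamp]
      split_ifs <;> rfl
    rw [hred, ih]
    simp [pvSuffix, pvLast]

theorem search_eq_alt (priorities : List Int) (next cnt : Int) :
    search priorities next cnt = search_alt priorities next cnt := by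
  by_cases hle : cnt ≤ 1
  · -- no scan: A's range is empty, B's guard fires
    unfold search search_alt
    rw [if_pos hle, PySem.List.pyRange_one_eq_nil (by omega)]
    simp
  · unfold search search_alt
    rw [if_neg hle]
    have hB : (PySem.List.pyRange 0 (cnt - 1) 1).foldl
        (fun (order : List Int) (_ : Int) =>
          let i := PySem.List.pyGetD order (-1) 0 + 1
          order ++ [if i = cnt then 0 else i])
        [next]
      = next :: pvSuffix cnt (PySem.List.pyRange 0 (cnt - 1) 1) next := by
      have := pv_loopB cnt (PySem.List.pyRange 0 (cnt - 1) 1) [] next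
      simpa using this
    rw [pv_loopA priorities cnt (PySem.List.pyRange 0 (cnt - 1) 1) next next]
    simp only [hB, List.map_cons, PySem.List.max?_id_cons, Option.getD_some]
    rw [pv_champ_find (fun i => PySem.List.pyGetD priorities i 0)
      (pvSuffix cnt (PySem.List.pyRange 0 (cnt - 1) 1) next) next]
    simp

-- ===== VERDICT (by name: the statement is the Claim_ definition above) =====
theorem search_spec : Claim_equal_search := by
  intro priorities next cnt _hdom _hpre
  unfold Spec_search
  exact search_eq_alt priorities next cnt
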